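-- pv_equiv track=rewrite | github.com/xenon413/leetcode | 2554.maximum-number-of-integers-to-choose-from-a-range-i/main.py | maxCount
-- ===== SOURCE A (Python) =====
-- from typing import List
--
-- def maxCount(banned: List[int], n: int, maxSum: int) -> int:
--     banned = list(set(banned))
--     banned.sort()
--     i = 0
--     j = 1
--
--     cur_sum = 0
--     cnt=0
--     while True:
--         if j == banned[i]:
--             j+=1
--             i = min(i+1, len(banned)-1)
--             continue
--
--         if j > n:
--             break
--
--         if cur_sum + j > maxSum:
--             break
--
--         cur_sum += j
--         j += 1
--         cnt += 1
--
--     return cnt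
-- ===== SOURCE B (Python) =====
-- import math
--
-- def maxCount(banned, n, maxSum):
--     # Walk the gaps between the sorted relevant banned values, adding each
--     # contiguous block of allowed integers with the triangular-sum closed form;
--     # the last, partially affordable block is cut by solving a quadratic.
--     bs = [b for b in sorted(set(banned)) if 1 <= b <= n]
--     cnt = 0
--     rem = maxSum
--     lo = 1
--     for b in bs + [n + 1]:
--         hi = b - 1
--         if lo <= hi:
--             block = (lo + hi) * (hi - lo + 1) // 2
--             if block <= rem:
--                 rem -= block
--                 cnt += hi - lo + 1
--             elif rem < lo:
--                 return cnt
--             else: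
--                 # largest t with lo + (lo+1) + ... + (lo+t-1) <= rem
--                 t = (math.isqrt((2 * lo - 1) ** 2 + 8 * rem) - (2 * lo - 1)) // 2
--                 return cnt + t
--         lo = b + 1
--     return cnt
-- ===== Notes on version B (the rewrite author's own statement) =====
-- stated objective: alternative
-- what changed: B (asymptotically lighter in the answer size, though unconfirmed in a timing run since large random banned lists fall outside Pre_) replaces A's one-by-one counting loop over 1,2,3,... with a walk over the sorted banned values restricted to [1,n]: each contiguous un-banned block is added wholesale via the triangular-sum closed form and the final partial block is cut by solving a quadratic with an integer square root; …
-- outside the precondition, e.g. on maxCount([-1, 2], 3, 100): A returns 3, B returns 2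
import Mathlib
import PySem

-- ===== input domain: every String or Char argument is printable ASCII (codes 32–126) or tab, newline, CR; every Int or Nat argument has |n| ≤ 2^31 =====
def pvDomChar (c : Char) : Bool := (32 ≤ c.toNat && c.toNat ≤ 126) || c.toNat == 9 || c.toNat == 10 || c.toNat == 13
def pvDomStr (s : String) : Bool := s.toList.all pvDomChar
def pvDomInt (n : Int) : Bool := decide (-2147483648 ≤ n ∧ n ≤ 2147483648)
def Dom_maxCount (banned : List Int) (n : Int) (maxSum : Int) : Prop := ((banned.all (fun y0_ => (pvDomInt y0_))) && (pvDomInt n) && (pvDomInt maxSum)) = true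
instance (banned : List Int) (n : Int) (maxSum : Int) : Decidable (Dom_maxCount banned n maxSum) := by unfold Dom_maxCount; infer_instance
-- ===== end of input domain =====

-- B walks the sorted banned gaps with triangular-sum closed forms instead of A's
-- one-by-one counting loop; return-value equivalence only (A sorts its local copy only).

-- ===== PORT A =====
-- A's while-loop; every iteration increments j, so the fuel chosen in maxCount
-- (n.toNat + max banned value + 2) is never exhausted before the loop breaks.
-- banned[i] is b.getD i 0: under Pre_ (banned ≠ []) the index i is always in range.
def maxCountLoopA (b : List Int) (n maxSum : Int) : Nat → Nat → Int → Int → Int → Int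
  | 0, _, _, _, cnt => cnt
  | f+1, i, j, curSum, cnt =>
    if j = b.getD i 0 then
      maxCountLoopA b n maxSum f (min (i+1) (b.length - 1)) (j+1) curSum cnt
    else if n < j then cnt
    else if maxSum < curSum + j then cnt
    else maxCountLoopA b n maxSum f i (j+1) (curSum + j) (cnt + 1)

def maxCount (banned : List Int) (n : Int) (maxSum : Int) : Int :=
  let b := PySem.List.sorted (PySem.Set.ofList banned) (fun x => x) false
  maxCountLoopA b n maxSum (n.toNat + b.foldl (fun a x => max a x.toNat) 0 + 2) 0 1 0 0

-- ===== PORT B =====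
-- math.isqrt dd (reached only with dd > 0) is ported as Nat.sqrt dd.toNat — exact on nonnegative ints.
def maxCountAltLoop : List Int → Int → Int → Int → Int
  | [], cnt, _, _ => cnt
  | b :: rest, cnt, rem, lo =>
    let hi := b - 1
    if lo ≤ hi then
      let block := PySem.Int.floordiv ((lo + hi) * (hi - lo + 1)) 2
      if block ≤ rem then maxCountAltLoop rest (cnt + (hi - lo + 1)) (rem - block) (b + 1)
      else if rem < lo then cnt
      else cnt + PySem.Int.floordiv ((Nat.sqrt ((2*lo - 1)^2 + 8*rem).toNat : Int) - (2*lo - 1)) 2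
    else maxCountAltLoop rest cnt rem (b + 1)

def maxCount_alt (banned : List Int) (n : Int) (maxSum : Int) : Int :=
  let bs := (PySem.List.sorted (PySem.Set.ofList banned) (fun x => x) false).filter
    (fun b => decide (1 ≤ b) && decide (b ≤ n))
  maxCountAltLoop (bs ++ [n + 1]) 0 maxSum 1

-- ===== PRECONDITION & SPEC =====
-- Pre_ excludes banned = [], on which A raises IndexError (banned[0]); it further
-- excludes only banned lists that are outside the problem's stated domain
-- 1 ≤ banned[i] (they contain a nonpositive value, on which A's two-pointer stalls
-- so that A silently ignores the entire banned list) AND whose ban of some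
-- reachable value b (1 ≤ b ≤ n, b*(b+1) ≤ 2*maxSum) can actually change the count;
-- out-of-domain lists whose invalid values cannot influence the result stay inside.
def Pre_maxCount (banned : List Int) (n : Int) (maxSum : Int) : Prop :=
  banned ≠ [] ∧ ((∀ x ∈ banned, 1 ≤ x) ∨ (∀ c ∈ banned, ¬(1 ≤ c ∧ c ≤ n ∧ c*(c+1) ≤ 2*maxSum)))
instance (banned : List Int) (n : Int) (maxSum : Int) : Decidable (Pre_maxCount banned n maxSum) := by unfold Pre_maxCount; infer_instance
def pvWitness_maxCount : List Int × Int × Int := ([1, 4], 6, 10)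

def Spec_maxCount (banned : List Int) (n : Int) (maxSum : Int) (out : Int) : Prop := out = maxCount_alt banned n maxSum
instance (banned : List Int) (n : Int) (maxSum : Int) (out : Int) : Decidable (Spec_maxCount banned n maxSum out) := by unfold Spec_maxCount; infer_instance

-- ===== CLAIM (what is proved, stated in full; the proofs are below) =====
def Claim_equal_maxCount : Prop := ∀ (banned : List Int) (n : Int) (maxSum : Int), Dom_maxCount banned n maxSum → Pre_maxCount banned n maxSum → Spec_maxCount banned n maxSum (maxCount banned n maxSum)

-- ===== LEMMAS AND PROOFS =====

-- A's loop after the banned list is fully accounted for: skip members of S, count the rest.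
def sgo (S : List Int) (n maxSum : Int) : Nat → Int → Int → Int → Int
  | 0, _, _, cnt => cnt
  | f+1, j, sum, cnt =>
    if j ∈ S then sgo S n maxSum f (j+1) sum cnt
    else if n < j then cnt
    else if maxSum < sum + j then cnt
    else sgo S n maxSum f (j+1) (sum + j) (cnt + 1)

theorem sgo_high (S : List Int) (n ms : Int) :
    ∀ (f : Nat) (j sum cnt : Int), n < j → sgo S n ms f j sum cnt = cnt := by
  intro f
  induction f with
  | zero => intro j sum cnt _; rfl
  | succ f ih =>
    intro j sum cnt h
    simp only [sgo]
    by_cases hm : j ∈ S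
    · simp only [if_pos hm]; exact ih (j+1) sum cnt (by omega)
    · simp only [if_neg hm, if_pos h]

theorem sgo_stop (S : List Int) (n ms : Int) :
    ∀ (f : Nat) (j sum cnt : Int), ms < sum + j → sgo S n ms f j sum cnt = cnt := by
  intro f
  induction f with
  | zero => intro j sum cnt _; rfl
  | succ f ih =>
    intro j sum cnt h
    simp only [sgo]
    by_cases hm : j ∈ S
    · simp only [if_pos hm]; exact ih (j+1) sum cnt (by omega)
    · simp only [if_neg hm]
      by_cases hn : n < j
      · simp only [if_pos hn]
      · simp only [if_neg hn, if_pos h]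

def triSum (j : Int) : Nat → Int
  | 0 => 0
  | k+1 => j + triSum (j+1) k

theorem triSum_formula : ∀ (k : Nat) (j : Int), 2 * triSum j k = (k : Int) * (2*j + k - 1) := by
  intro k
  induction k with
  | zero => intro j; simp [triSum]
  | succ k ih =>
    intro j
    simp only [triSum]
    push_cast
    linear_combination ih (j+1)

theorem triSum_nonneg : ∀ (k : Nat) (j : Int), 1 ≤ j → 0 ≤ triSum j k := by
  intro k
  induction k with
  | zero => intro j _; simp [triSum]
  | succ k ih =>
    intro j hj
    have := ih (j+1) (by omega)
    simp only [triSum]; omega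

theorem sgo_run (S : List Int) (n ms : Int) :
    ∀ (k : Nat) (f : Nat) (j sum cnt : Int), k ≤ f → 1 ≤ j →
      (∀ m : Nat, m < k → (j + (m:Int)) ∉ S) → j + k - 1 ≤ n → sum + triSum j k ≤ ms →
      sgo S n ms f j sum cnt = sgo S n ms (f - k) (j + k) (sum + triSum j k) (cnt + k) := by
  intro k
  induction k with
  | zero => intro f j sum cnt _ _ _ _ _; simp [triSum]
  | succ k ih =>
    intro f j sum cnt hkf hj hnot hn hsum
    match f, hkf with
    | f+1, hkf =>
      have h0 : j ∉ S := by have := hnot 0 (by omega); simpa using this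
      have htn : 0 ≤ triSum (j+1) k := triSum_nonneg k (j+1) (by omega)
      have hst : triSum j (k+1) = j + triSum (j+1) k := rfl
      simp only [sgo, if_neg h0, if_neg (show ¬ n < j by push_cast at hn; omega),
        if_neg (show ¬ ms < sum + j by rw [hst] at hsum; omega)]
      have := ih f (j+1) (sum+j) (cnt+1) (by omega) (by omega)
        (by intro m hm; have := hnot (m+1) (by omega); push_cast at this ⊢
            convert this using 2; ring)
        (by push_cast at hn ⊢; omega)
        (by rw [hst] at hsum; push_cast at hsum ⊢; linarith)
      rw [this]
      congr 1
      · omega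
      · push_cast; ring
      · rw [hst]; push_cast; ring
      · push_cast; ring

theorem fdiv2_bounds (x : Int) : 2 * PySem.Int.floordiv x 2 ≤ x ∧ x ≤ 2 * PySem.Int.floordiv x 2 + 1 := by
  rw [PySem.Int.floordiv_eq_ediv_of_pos (by norm_num)]
  omega

theorem sqrt_bounds (dd : Int) (h : 0 ≤ dd) :
    ((Nat.sqrt dd.toNat : Int)) * (Nat.sqrt dd.toNat : Int) ≤ dd ∧
      dd < ((Nat.sqrt dd.toNat : Int) + 1) * ((Nat.sqrt dd.toNat : Int) + 1) := by
  have h1 := Nat.sqrt_le dd.toNat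
  have h2 := Nat.lt_succ_sqrt dd.toNat
  have e1 : ((dd.toNat : Int)) = dd := by omega
  constructor
  · calc ((Nat.sqrt dd.toNat : Int)) * (Nat.sqrt dd.toNat : Int)
        = ((Nat.sqrt dd.toNat * Nat.sqrt dd.toNat : Nat) : Int) := by push_cast; ring
      _ ≤ ((dd.toNat : Int)) := by exact_mod_cast h1
      _ = dd := e1
  · calc dd = ((dd.toNat : Int)) := e1.symm
      _ < ((Nat.succ (Nat.sqrt dd.toNat) * Nat.succ (Nat.sqrt dd.toNat) : Nat) : Int) := by exact_mod_cast h2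
      _ = ((Nat.sqrt dd.toNat : Int) + 1) * ((Nat.sqrt dd.toNat : Int) + 1) := by push_cast; ring

-- the value B's final branch adds: 0 if even lo is unaffordable, else the quadratic cutoff
def cutT (lo rem : Int) : Int :=
  if rem < lo then 0
  else PySem.Int.floordiv ((Nat.sqrt ((2*lo - 1)^2 + 8*rem).toNat : Int) - (2*lo - 1)) 2

theorem cutT_zero (lo rem : Int) (hrem : rem < lo) : cutT lo rem = 0 := by
  unfold cutT; simp [if_pos hrem]

theorem cutT_pos (lo rem : Int) (hlo : 1 ≤ lo) (hrem : lo ≤ rem) :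
    1 ≤ cutT lo rem ∧ cutT lo rem * (2*lo + cutT lo rem - 1) ≤ 2*rem ∧
      2*rem < (cutT lo rem + 1) * (2*lo + cutT lo rem) := by
  have h : 0 ≤ (2*lo - 1)^2 + 8*rem := by nlinarith
  unfold cutT
  rw [if_neg (by omega)]
  set dd := (2*lo - 1)^2 + 8*rem with hdd
  set s : Int := (Nat.sqrt dd.toNat : Int) with hs
  obtain ⟨hs1, hs2⟩ := sqrt_bounds dd h
  have hsnn : 0 ≤ s := by positivity
  have hge : (2*lo + 1)^2 ≤ dd := by nlinarith
  have hsge : 2*lo + 1 ≤ s := by nlinarith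
  obtain ⟨hf1, hf2⟩ := fdiv2_bounds (s - (2*lo - 1))
  set t := PySem.Int.floordiv (s - (2*lo - 1)) 2 with ht
  have ht1 : 1 ≤ t := by omega
  refine ⟨ht1, ?_, ?_⟩
  · nlinarith [sq_nonneg (2*t + (2*lo - 1))]
  · nlinarith [sq_nonneg (s + 1)]

theorem sgo_partial (S : List Int) (n ms : Int) (lo sum cnt : Int) (f : Nat) (hi : Int)
    (hlo : 1 ≤ lo) (hlohi : lo ≤ hi) (hhin : hi ≤ n)
    (hnomem : ∀ s ∈ S, ¬(lo ≤ s ∧ s ≤ hi))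
    (hf : (n + 1 - lo).toNat ≤ f)
    (hblk : 2*(ms - sum) < (lo + hi) * (hi - lo + 1)) :
    sgo S n ms f lo sum cnt = cnt + cutT lo (ms - sum) := by
  by_cases hr : ms - sum < lo
  · rw [cutT_zero _ _ hr, sgo_stop _ _ _ _ _ _ _ (by omega)]
    ring
  · obtain ⟨ht1, hineq1, hineq2⟩ := cutT_pos lo (ms - sum) hlo (by omega)
    set T := cutT lo (ms - sum) with hT
    have hTle : T ≤ hi - lo := by nlinarith
    have hTnat : ((T.toNat : Int)) = T := by omega
    have htsum : 2 * triSum lo T.toNat = T * (2*lo + T - 1) := by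
      have h := triSum_formula T.toNat lo; rw [hTnat] at h; exact h
    rw [sgo_run S n ms T.toNat f lo sum cnt (by omega) hlo
      (by intro m hm hmem
          exact hnomem _ hmem ⟨by omega, by omega⟩)
      (by omega) (by omega)]
    have hexp : (T+1)*(2*lo+T) = T*(2*lo+T-1) + 2*lo + 2*T := by ring
    rw [sgo_stop _ _ _ _ _ _ _ (by rw [hTnat]; linarith)]
    omega

-- B's final branch (return cnt / return cnt + t) written as cnt + cutT
theorem port_cut (lo rem cnt : Int) :
    (if rem < lo then cnt
     else cnt + PySem.Int.floordiv ((Nat.sqrt ((2*lo - 1)^2 + 8*rem).toNat : Int) - (2*lo - 1)) 2)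
      = cnt + cutT lo rem := by
  unfold cutT
  split_ifs <;> ring

theorem alt_eq_sgo (S : List Int) (n ms : Int)
    (hmem : ∀ s ∈ S, 1 ≤ s ∧ s ≤ n) :
    ∀ (l : List Int) (lo sum cnt : Int) (f : Nat),
      l.Pairwise (· < ·) → (∀ s, s ∈ l → s ∈ S) → (∀ s ∈ S, lo ≤ s ↔ s ∈ l) →
      1 ≤ lo → (n + 1 - lo).toNat ≤ f →
      maxCountAltLoop (l ++ [n+1]) cnt (ms - sum) lo = sgo S n ms f lo sum cnt := by
  intro l
  induction l with
  | nil =>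
    intro lo sum cnt f _ _ hiff hlo hf
    have hnoS : ∀ s ∈ S, ¬ (lo ≤ s) := fun s hs h => by
      have := (hiff s hs).1 h; simp at this
    simp only [List.nil_append, maxCountAltLoop]
    have hhi : n + 1 - 1 = n := by ring
    rw [hhi]
    by_cases hln : lo ≤ n
    · rw [if_pos hln]
      have h2b : 2 * PySem.Int.floordiv ((lo + n) * (n - lo + 1)) 2 = (lo + n) * (n - lo + 1) := by
        have hev : ∃ m : Int, (lo + n) * (n - lo + 1) = 2 * m := by
          rcases Int.even_or_odd (lo + n) with ⟨m, hm⟩ | ⟨m, hm⟩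
          · exact ⟨m * (n - lo + 1), by rw [hm]; ring⟩
          · have h2 : n - lo + 1 = 2 * (m + 1 - lo) := by omega
            exact ⟨(2*m + 1) * (m + 1 - lo), by rw [hm, h2]; ring⟩
        obtain ⟨m, hm⟩ := hev
        rw [hm, PySem.Int.floordiv_eq_ediv_of_pos (by norm_num)]
        omega
      set L : Nat := (n - lo + 1).toNat with hL
      have hLe : (L:Int) = n - lo + 1 := by omega
      have hts : 2 * triSum lo L = (lo + n) * (n - lo + 1) := by
        have h := triSum_formula L lo; rw [hLe] at h; rw [h]; ring
      set block := PySem.Int.floordiv ((lo + n) * (n - lo + 1)) 2 with hb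
      have hbt : block = triSum lo L := by omega
      by_cases hfits : block ≤ ms - sum
      · rw [if_pos hfits]
        rw [sgo_run S n ms L f lo sum cnt (by omega) hlo
          (fun m hm hmemS => hnoS _ hmemS (by omega)) (by omega) (by omega)]
        rw [sgo_high _ _ _ _ _ _ _ (by omega)]
        show cnt + (n - lo + 1) = cnt + (L:Int)
        omega
      · rw [if_neg hfits]
        rw [sgo_partial S n ms lo sum cnt f n hlo hln le_rfl
          (fun s hs ⟨h1, _⟩ => hnoS s hs h1) hf (by omega)]
        exact port_cut lo (ms - sum) cnt
    · rw [if_neg (by omega)]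
      rw [sgo_high _ _ _ _ _ _ _ (by omega)]
  | cons r rs ih =>
    intro lo sum cnt f hpair hsub hiff hlo hf
    have hrS : r ∈ S := hsub r List.mem_cons_self
    obtain ⟨hr1, hrn⟩ := hmem r hrS
    have hlor : lo ≤ r := (hiff r hrS).2 List.mem_cons_self
    have hhead : ∀ b ∈ rs, r < b := (List.pairwise_cons.1 hpair).1
    have hno : ∀ s ∈ S, ¬(lo ≤ s ∧ s ≤ r - 1) := by
      intro s hs ⟨h1, h2⟩
      rcases List.mem_cons.1 ((hiff s hs).1 h1) with h | h
      · omega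
      · have := hhead s h; omega
    have hsub' : ∀ s, s ∈ rs → s ∈ S := fun s h => hsub s (List.mem_cons_of_mem _ h)
    have hiff' : ∀ s ∈ S, r + 1 ≤ s ↔ s ∈ rs := by
      intro s hs
      constructor
      · intro h
        rcases List.mem_cons.1 ((hiff s hs).1 (by omega)) with h' | h'
        · omega
        · exact h'
      · intro h; have := hhead s h; omega
    simp only [List.cons_append, maxCountAltLoop]
    by_cases hblk : lo ≤ r - 1
    · rw [if_pos hblk]
      have h2b : 2 * PySem.Int.floordiv ((lo + (r-1)) * ((r-1) - lo + 1)) 2 = (lo + (r-1)) * ((r-1) - lo + 1) := by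
        have hev : ∃ m : Int, (lo + (r-1)) * ((r-1) - lo + 1) = 2 * m := by
          rcases Int.even_or_odd (lo + (r-1)) with ⟨m, hm⟩ | ⟨m, hm⟩
          · exact ⟨m * ((r-1) - lo + 1), by rw [hm]; ring⟩
          · have h2 : (r-1) - lo + 1 = 2 * (m + 1 - lo) := by omega
            exact ⟨(2*m + 1) * (m + 1 - lo), by rw [hm, h2]; ring⟩
        obtain ⟨m, hm⟩ := hev
        rw [hm, PySem.Int.floordiv_eq_ediv_of_pos (by norm_num)]
        omega
      set L : Nat := (r - 1 - lo + 1).toNat with hL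
      have hLe : (L:Int) = r - lo := by omega
      have hts : 2 * triSum lo L = (lo + (r-1)) * ((r-1) - lo + 1) := by
        have h := triSum_formula L lo; rw [hLe] at h; rw [h]; ring
      set block := PySem.Int.floordiv ((lo + (r-1)) * ((r-1) - lo + 1)) 2 with hb
      have hbt : block = triSum lo L := by omega
      by_cases hfits : block ≤ ms - sum
      · rw [if_pos hfits]
        rw [sgo_run S n ms L f lo sum cnt (by omega) hlo
          (fun m hm hmemS => hno _ hmemS ⟨by omega, by omega⟩) (by omega) (by omega)]
        have hjr : lo + (L:Int) = r := by omega
        obtain ⟨g, hg⟩ : ∃ g, f - L = g + 1 := ⟨f - L - 1, by omega⟩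
        rw [hjr, hg]
        simp only [sgo, if_pos hrS]
        have e1 : ms - sum - block = ms - (sum + triSum lo L) := by omega
        have e2 : cnt + (r - 1 - lo + 1) = cnt + (L:Int) := by omega
        rw [e1, e2]
        exact ih (r+1) (sum + triSum lo L) (cnt + (L:Int)) g
          (List.pairwise_cons.1 hpair).2 hsub' hiff' (by omega) (by omega)
      · rw [if_neg hfits]
        rw [sgo_partial S n ms lo sum cnt f (r-1) hlo hblk (by omega)
          (fun s hs h => hno s hs h) hf (by omega)]
        exact port_cut lo (ms - sum) cnt
    · rw [if_neg hblk]
      have hlr : lo = r := by omega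
      obtain ⟨g, hg⟩ : ∃ g, f = g + 1 := ⟨f - 1, by omega⟩
      rw [hg]
      simp only [sgo, if_pos (show lo ∈ S from hlr ▸ hrS)]
      have e1 : lo + 1 = r + 1 := by omega
      rw [e1]
      exact ih (r+1) sum cnt g (List.pairwise_cons.1 hpair).2 hsub' hiff' (by omega) (by omega)

theorem loopA_eq_sgo (b : List Int) (n ms : Int) (hb : b.Pairwise (· < ·)) :
    ∀ (f : Nat) (i : Nat) (j sum cnt : Int) (hilen : i < b.length),
      (∀ k (_ : k < b.length), k < i → b[k] < j) →
      (b[i] < j → ∀ x ∈ b, x < j) →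
      maxCountLoopA b n ms f i j sum cnt = sgo b n ms f j sum cnt := by
  have hpg := List.pairwise_iff_getElem.1 hb
  intro f
  induction f with
  | zero => intro i j sum cnt _ _ _; rfl
  | succ f ih =>
    intro i j sum cnt hilen hinv1 hinv2
    have hget : b.getD i 0 = b[i] := List.getD_eq_getElem b 0 hilen
    by_cases heq : j = b[i]
    · have hmem : j ∈ b := heq ▸ List.getElem_mem hilen
      simp only [maxCountLoopA, sgo, hget, if_pos heq, if_pos hmem]
      by_cases hil : i + 1 < b.length
      · have hmin : min (i+1) (b.length - 1) = i + 1 := by omega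
        rw [hmin]
        apply ih (i+1) (j+1) sum cnt hil
        · intro k hk hki
          rcases Nat.lt_or_ge k i with h | h
          · have := hinv1 k hk h; omega
          · have hki' : k = i := by omega
            subst hki'; omega
        · intro hlt
          exfalso
          have := hpg i (i+1) (by omega) hil (by omega)
          omega
      · have hie : i = b.length - 1 := by omega
        have hmin : min (i+1) (b.length - 1) = i := by omega
        rw [hmin]
        apply ih i (j+1) sum cnt hilen
        · intro k hk hki; have := hinv1 k hk hki; omega
        · intro _ x hx
          obtain ⟨m, hm, hmx⟩ := List.getElem_of_mem hx
          rcases Nat.lt_or_ge m i with h | h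
          · have := hinv1 m hm h; omega
          · have : m = i := by omega
            subst this; omega
    · have hnmem : j ∉ b := by
        intro hjb
        obtain ⟨m, hm, hmx⟩ := List.getElem_of_mem hjb
        rcases Nat.lt_trichotomy m i with h | h | h
        · have := hinv1 m hm h; omega
        · subst h; exact heq hmx.symm
        · have hbi : b[i] < b[m] := hpg i m hilen hm h
          have : b[i] < j := by omega
          have := hinv2 this b[m] (List.getElem_mem hm)
          omega
      simp only [maxCountLoopA, sgo, hget, if_neg heq, if_neg hnmem]
      by_cases hn : n < j
      · simp only [if_pos hn]
      · simp only [if_neg hn]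
        by_cases hs : ms < sum + j
        · simp only [if_pos hs]
        · simp only [if_neg hs]
          apply ih i (j+1) (sum+j) (cnt+1) hilen
          · intro k hk hki; have := hinv1 k hk hki; omega
          · intro hlt
            have hbij : b[i] < j := by
              have : b[i] ≠ j := fun h => heq h.symm
              omega
            intro x hx
            have := hinv2 hbij x hx; omega

theorem sgo_filter (S : List Int) (n ms : Int) :
    ∀ (f : Nat) (j sum cnt : Int),
      sgo S n ms f j sum cnt = sgo (S.filter (fun x => x ≤ n)) n ms f j sum cnt := by
  intro f
  induction f with
  | zero => intro j sum cnt; rfl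
  | succ f ih =>
    intro j sum cnt
    by_cases hn : n < j
    · rw [sgo_high _ _ _ _ _ _ _ hn, sgo_high _ _ _ _ _ _ _ hn]
    · have hmem : (j ∈ S) ↔ (j ∈ S.filter (fun x => x ≤ n)) := by
        simp [List.mem_filter]; omega
      simp only [sgo]
      by_cases hm : j ∈ S
      · simp only [if_pos hm, if_pos (hmem.1 hm)]; exact ih (j+1) sum cnt
      · simp only [if_neg hm, if_neg (fun h => hm (hmem.2 h)), if_neg hn]
        by_cases hs : ms < sum + j
        · simp only [if_pos hs]
        · simp only [if_neg hs]; exact ih (j+1) (sum+j) (cnt+1)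

-- A's loop when the sorted head is nonpositive: i is stuck at 0 and j never matches, so nothing is ever skipped.
theorem loopA_stuck (b : List Int) (n ms : Int) (h0 : b.getD 0 0 ≤ 0) :
    ∀ (f : Nat) (j sum cnt : Int), 1 ≤ j →
      maxCountLoopA b n ms f 0 j sum cnt = sgo ([] : List Int) n ms f j sum cnt := by
  intro f
  induction f with
  | zero => intro j sum cnt _; rfl
  | succ f ih =>
    intro j sum cnt hj
    simp only [maxCountLoopA, sgo, List.not_mem_nil, if_false,
      if_neg (show ¬ j = b.getD 0 0 by omega)]
    by_cases hn : n < j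
    · simp only [if_pos hn]
    · simp only [if_neg hn]
      by_cases hs : ms < sum + j
      · simp only [if_pos hs]
      · simp only [if_neg hs]
        exact ih (j+1) (sum+j) (cnt+1) (by omega)

-- Skipping values the budget can never reach changes nothing.
theorem sgo_unreachable (S : List Int) (n ms : Int) :
    ∀ (f : Nat) (j sum cnt : Int),
      (∀ s ∈ S, j ≤ s → ms < sum + triSum j (s - j + 1).toNat) →
      sgo S n ms f j sum cnt = sgo ([] : List Int) n ms f j sum cnt := by
  intro f
  induction f with
  | zero => intro j sum cnt _; rfl
  | succ f ih =>
    intro j sum cnt H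
    by_cases hm : j ∈ S
    · have h1 : (j - j + 1).toNat = 1 := by omega
      have hj := H j hm le_rfl
      rw [h1] at hj
      simp only [triSum] at hj
      have hstop : ms < sum + j := by omega
      rw [sgo_stop S n ms (f+1) j sum cnt hstop]
      by_cases hn : n < j
      · rw [sgo_high _ _ _ _ _ _ _ hn]
      · rw [sgo_stop _ _ _ _ _ _ _ hstop]
    · simp only [sgo, if_neg hm, List.not_mem_nil, if_false]
      by_cases hn : n < j
      · simp only [if_pos hn]
      · simp only [if_neg hn]
        by_cases hs : ms < sum + j
        · simp only [if_pos hs]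
        · simp only [if_neg hs]
          apply ih (j+1) (sum+j) (cnt+1)
          intro s hs' hjs
          have hH := H s hs' (by omega)
          have hk : (s - j + 1).toNat = (s - (j+1) + 1).toNat + 1 := by omega
          rw [hk] at hH
          simp only [triSum] at hH
          have he : s - (j + 1) + 1 = s - j := by ring
          rw [he] at hH ⊢
          omega

theorem main_equiv (banned : List Int) (n ms : Int)
    (hpre : banned ≠ [] ∧ ((∀ x ∈ banned, 1 ≤ x) ∨ (∀ c ∈ banned, ¬(1 ≤ c ∧ c ≤ n ∧ c*(c+1) ≤ 2*ms)))) :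
    maxCount banned n ms = maxCount_alt banned n ms := by
  obtain ⟨hne, hdisj⟩ := hpre
  simp only [maxCount, maxCount_alt]
  set b := PySem.List.sorted (PySem.Set.ofList banned) (fun x => x) false with hbdef
  have hbpair : b.Pairwise (· < ·) := PySem.List.sorted_ofList_pairwise_lt banned
  have hbmem : ∀ x, x ∈ b ↔ x ∈ banned := by
    intro x; rw [hbdef, PySem.List.mem_sorted, PySem.Set.mem_ofList]
  have hbne : b ≠ [] := by
    obtain ⟨x, hx⟩ := List.exists_mem_of_ne_nil banned hne
    exact List.ne_nil_of_mem ((hbmem x).2 hx)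
  set F := n.toNat + b.foldl (fun a x => max a x.toNat) 0 + 2 with hF
  have hFn : (n + 1 - 1).toNat ≤ F := by omega
  have hlen : 0 < b.length := List.length_pos_of_ne_nil hbne
  set S := b.filter (fun x => decide (1 ≤ x) && decide (x ≤ n)) with hSdef
  have hSmem : ∀ s ∈ S, 1 ≤ s ∧ s ≤ n := by
    intro s hs
    rw [hSdef, List.mem_filter] at hs
    have := hs.2
    simp only [Bool.and_eq_true, decide_eq_true_eq] at this
    exact this
  have hSpair : S.Pairwise (· < ·) := hbpair.filter _
  have halt := alt_eq_sgo S n ms hSmem S 1 0 0 F hSpair (fun s h => h)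
    (fun s hs => ⟨fun _ => hs, fun _ => (hSmem s hs).1⟩) (by omega) hFn
  simp only [sub_zero] at halt
  by_cases hall : ∀ x ∈ b, 1 ≤ x
  · -- every banned value positive: A honours the whole sorted banned list
    rw [loopA_eq_sgo b n ms hbpair F 0 1 0 0 hlen
      (fun k _ hki => absurd hki (Nat.not_lt_zero k))
      (fun hlt => absurd hlt (by have := hall b[0] (List.getElem_mem hlen); omega))]
    rw [sgo_filter b n ms F 1 0 0]
    have hfe : b.filter (fun x => decide (1 ≤ x) && decide (x ≤ n)) = b.filter (fun x => x ≤ n) := by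
      apply List.filter_congr
      intro x hx
      have h1 : decide (1 ≤ x) = true := decide_eq_true (hall x hx)
      simp [h1]
    rw [← hfe, ← hSdef]
    exact halt.symm
  · -- some banned value ≤ 0: A's pointer stalls (skips nothing); Pre_ says every
    -- positive banned value is beyond the budget, so B's skips change nothing either
    have hirr : ∀ c ∈ banned, ¬(1 ≤ c ∧ c ≤ n ∧ c*(c+1) ≤ 2*ms) := by
      rcases hdisj with h | h
      · exact absurd (fun x hx => h x ((hbmem x).1 hx)) hall
      · exact h
    have h0 : b.getD 0 0 ≤ 0 := by
      simp only [not_forall, not_le] at hall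
      obtain ⟨x, hx, hx0⟩ := hall
      obtain ⟨m, hm, hmx⟩ := List.getElem_of_mem hx
      have hget : b.getD 0 0 = b[0] := List.getD_eq_getElem b 0 hlen
      rcases Nat.eq_zero_or_pos m with h | h
      · subst h; omega
      · have := (List.pairwise_iff_getElem.1 hbpair) 0 m hlen hm h
        omega
    rw [loopA_stuck b n ms h0 F 1 0 0 (by omega)]
    rw [halt]
    refine (sgo_unreachable S n ms F 1 0 0 ?_).symm
    intro s hs hjs
    obtain ⟨h1s, hsn⟩ := hSmem s hs
    have hsb : s ∈ banned := (hbmem s).1 (List.mem_filter.1 (hSdef ▸ hs)).1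
    have hlarge : 2*ms < s*(s+1) := by
      have hn2 := hirr s hsb
      by_contra hc
      exact hn2 ⟨h1s, hsn, by omega⟩
    have hk : ((s - 1 + 1).toNat : Int) = s := by omega
    have htf := triSum_formula (s - 1 + 1).toNat 1
    rw [hk] at htf
    nlinarith [htf]

-- ===== VERDICT (by name: the statement is the Claim_ definition above) =====
theorem maxCount_spec : Claim_equal_maxCount := by
  intro banned n ms _ hpre
  exact main_equiv banned n ms hpre
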